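-- pv_equiv track=rewrite | github.com/Elouan1411/completion-auto | completion-system/levenshtein.py | suggestions_completion
-- ===== SOURCE A (Python) =====
-- def optimized_levenshtein(a, b):
--     """
--     Version optimisée de la distance de Levenshtein utilisant seulement deux lignes.
--     Complexité : O(n * m) en temps et O(m) en espace.
--     """
--     n, m = len(a), len(b)
--     prev = list(range(m + 1))  # Ligne précédente
--     curr = [0] * (m + 1)       # Ligne courante
--
--     for i in range(1, n + 1):
--         curr[0] = i  # Initialisation de la première colonne
--         for j in range(1, m + 1):
--             insert = curr[j - 1] + 1
--             delete = prev[j] + 1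
--             substitute = prev[j - 1] + (0 if a[i - 1] == b[j - 1] else 1)
--             curr[j] = min(insert, delete, substitute)  # Calcul du coût minimal
--         prev, curr = curr, prev  # Échange des lignes
--
--     return prev[m]
--
-- def suggestions_completion(partiel, dictionnaire, seuil=3, max_suggestions=3):
--     distances = []
--     for mot in dictionnaire:
--             if abs(len(mot) - len(partiel)) <= seuil:  # Filtrage rapide sur la longueur
--                     dist = optimized_levenshtein(partiel, mot)
--                     if dist <= seuil:
--                         distances.append((mot, dist))
--
--     # Trier par distance et renvoyer les meilleures suggestions
--     distances.sort(key=lambda x: x[1])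
--     return [mot for mot, _ in distances[:max_suggestions]]
-- ===== SOURCE B (Python) =====
-- def _bounded_distance(a, b, seuil):
--     # One-row DP with a diagonal carry; abandons the word early (returns None)
--     # as soon as a whole row exceeds seuil (the distance can only grow then).
--     m = len(b)
--     row = list(range(m + 1))
--     for i, ca in enumerate(a, 1):
--         diag = row[0]
--         row[0] = i
--         for j, cb in enumerate(b, 1):
--             tmp = row[j]
--             row[j] = min(row[j] + 1, row[j - 1] + 1, diag + (ca != cb))
--             diag = tmp
--         if min(row) > seuil:
--             return None
--     return row[m]
--
--
-- def suggestions_completion(partiel, dictionnaire, seuil=3, max_suggestions=3):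
--     # Bucket the accepted words by distance (counting sort) instead of sorting.
--     buckets = {}
--     for mot in dictionnaire:
--         if abs(len(mot) - len(partiel)) <= seuil:
--             d = _bounded_distance(partiel, mot, seuil)
--             if d is not None and d <= seuil:
--                 buckets.setdefault(d, []).append(mot)
--     result = []
--     for d in sorted(buckets):
--         result.extend(buckets[d])
--     return result[:max_suggestions]
-- ===== Notes on version B (the rewrite author's own statement) =====
-- stated objective: alternative
-- what changed: The per-word distance uses a single-row DP with a diagonal carry that abandons a word as soon as a whole DP row exceeds seuil (early exit), and the final stable sort by distance is replaced by bucketing words per distance in a dict and concatenating buckets in increasing key order (counting sort).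
import Mathlib
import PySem

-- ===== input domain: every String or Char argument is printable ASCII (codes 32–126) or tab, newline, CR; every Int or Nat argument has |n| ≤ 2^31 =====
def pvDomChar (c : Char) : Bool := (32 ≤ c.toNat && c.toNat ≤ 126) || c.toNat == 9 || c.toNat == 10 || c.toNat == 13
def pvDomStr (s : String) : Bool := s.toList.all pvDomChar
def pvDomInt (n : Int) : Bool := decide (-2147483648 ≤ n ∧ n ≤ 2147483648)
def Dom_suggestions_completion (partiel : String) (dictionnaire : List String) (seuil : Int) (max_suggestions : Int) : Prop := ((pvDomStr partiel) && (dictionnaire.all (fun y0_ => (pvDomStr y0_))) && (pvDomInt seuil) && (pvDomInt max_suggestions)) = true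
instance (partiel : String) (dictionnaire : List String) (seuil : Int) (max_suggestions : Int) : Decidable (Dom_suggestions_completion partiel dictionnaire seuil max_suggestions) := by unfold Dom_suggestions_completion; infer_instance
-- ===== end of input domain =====

-- B replaces A's final stable sort by per-distance buckets concatenated in increasing key
-- order, and computes each distance with a one-row DP (diagonal carry) that abandons a word
-- once a whole DP row exceeds seuil; same results, alternative algorithm.

-- ===== PORT A =====
def optimized_levenshtein (a b : String) : Int :=
  let n := PySem.Str.len a
  let m := PySem.Str.len b
  let prev := PySem.List.pyRange 0 (m + 1) 1
  let curr := List.replicate (m + 1).toNat (0 : Int)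
  let pc := (PySem.List.pyRange 1 (n + 1) 1).foldl (fun (pc : List Int × List Int) i =>
      ((PySem.List.pyRange 1 (m + 1) 1).foldl (fun (curr : List Int) j =>
          let ins := PySem.List.pyGetD curr (j - 1) 0 + 1
          let del := PySem.List.pyGetD pc.1 j 0 + 1
          let sub := PySem.List.pyGetD pc.1 (j - 1) 0 +
            (if PySem.List.pyGetD a.toList (i - 1) ' ' = PySem.List.pyGetD b.toList (j - 1) ' ' then 0 else 1)
          curr.set j.toNat (min (min ins del) sub)) (pc.2.set 0 i), pc.1)) (prev, curr)
  PySem.List.pyGetD pc.1 m 0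

def suggestions_completion (partiel : String) (dictionnaire : List String) (seuil : Int) (max_suggestions : Int) : List String :=
  let distances := dictionnaire.foldl (fun (ds : List (String × Int)) mot =>
      if |PySem.Str.len mot - PySem.Str.len partiel| ≤ seuil then
        let dist := optimized_levenshtein partiel mot
        if dist ≤ seuil then ds ++ [(mot, dist)] else ds
      else ds) []
  let sortedDs := PySem.List.sorted distances (fun x => x.2) false
  (PySem.List.slice sortedDs none (some max_suggestions)).map (fun x => x.1)

-- ===== PORT B =====
-- B: inner column loop of the one-row DP: builds the new row tail left to right,
-- carrying the previous diagonal value and the freshly written left neighbour.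
def pvAltStep (ca : Char) : Int → Int → List Char → List Int → List Int
  | _, _, [], _ => []
  | _, _, _ :: _, [] => []
  | diag, prev, cb :: cbs, old :: olds =>
      let v := min (min (old + 1) (prev + 1)) (diag + (if ca = cb then 0 else 1))
      v :: pvAltStep ca old v cbs olds

def pvAltRow (ca : Char) (i : Int) (bl : List Char) (row : List Int) : List Int :=
  i :: pvAltStep ca (row.headD 0) i bl row.tail

def pvAltLoop (seuil : Int) (bl : List Char) (m : Int) : List Char → Int → List Int → Option Int
  | [], _, row => some (PySem.List.pyGetD row m 0)
  | ca :: rest, i, row =>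
      let row' := pvAltRow ca i bl row
      match PySem.List.min? row' (fun x => x) with
      | some mn => if mn > seuil then none else pvAltLoop seuil bl m rest (i + 1) row'
      | none => none

def pvAltDistance (a b : String) (seuil : Int) : Option Int :=
  let bl := b.toList
  let m := PySem.Str.len b
  pvAltLoop seuil bl m a.toList 1 (PySem.List.pyRange 0 (m + 1) 1)

def suggestions_completion_alt (partiel : String) (dictionnaire : List String) (seuil : Int) (max_suggestions : Int) : List String :=
  let buckets := dictionnaire.foldl (fun (bk : PySem.Dict Int (List String)) mot =>
      if |PySem.Str.len mot - PySem.Str.len partiel| ≤ seuil then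
        match pvAltDistance partiel mot seuil with
        | some d => if d ≤ seuil then bk.insert d (bk.getD d [] ++ [mot]) else bk
        | none => bk
      else bk) PySem.Dict.empty
  let result := (PySem.List.sorted buckets.keys (fun k => k) false).foldl
      (fun (acc : List String) d => acc ++ buckets.getD d []) []
  PySem.List.slice result none (some max_suggestions)

-- ===== PRECONDITION & SPEC =====
def Spec_suggestions_completion (partiel : String) (dictionnaire : List String) (seuil : Int) (max_suggestions : Int) (out : List String) : Prop := out = suggestions_completion_alt partiel dictionnaire seuil max_suggestions
instance (partiel : String) (dictionnaire : List String) (seuil : Int) (max_suggestions : Int) (out : List String) : Decidable (Spec_suggestions_completion partiel dictionnaire seuil max_suggestions out) := by unfold Spec_suggestions_completion; infer_instance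

-- ===== CLAIM (what is proved, stated in full; the proofs are below) =====
def Claim_equal_suggestions_completion : Prop := ∀ (partiel : String) (dictionnaire : List String) (seuil : Int) (max_suggestions : Int), Dom_suggestions_completion partiel dictionnaire seuil max_suggestions → Spec_suggestions_completion partiel dictionnaire seuil max_suggestions (suggestions_completion partiel dictionnaire seuil max_suggestions)

-- ===== LEMMAS AND PROOFS =====

-- The Levenshtein DP table both programs fill: pvCell al bl i j is the cell for the
-- length-i prefix of al against the length-j prefix of bl.
def pvCell (al bl : List Char) : Nat → Nat → Int
  | 0, j => (j : Int)
  | i+1, 0 => ((i : Int) + 1)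
  | i+1, j+1 =>
      min (min (pvCell al bl (i+1) j + 1) (pvCell al bl i (j+1) + 1))
        (pvCell al bl i j + (if al.getD i ' ' = bl.getD j ' ' then 0 else 1))
  termination_by i j => (i, j)

def pvRow (al bl : List Char) (i : Nat) : List Int :=
  (List.range (bl.length + 1)).map (fun t => pvCell al bl i t)

lemma pvCell_zero_right (al bl : List Char) (i : Nat) : pvCell al bl i 0 = (i : Int) := by
  cases i <;> simp [pvCell]

lemma pvGetD_set (l : List Int) (k t : Nat) (v d : Int) :
    (l.set k v).getD t d = if k = t ∧ k < l.length then v else l.getD t d := by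
  simp only [List.getD_eq_getElem?_getD, List.getElem?_set]
  split_ifs with h <;> simp_all
  omega

lemma pvGetD_map_range (f : Nat → Int) (n t : Nat) (d : Int) :
    ((List.range n).map f).getD t d = if t < n then f t else d := by
  split_ifs with h
  · rw [List.getD_eq_getElem?_getD]
    simp [h]
  · rw [List.getD_eq_getElem?_getD]
    have hnone : (List.range n)[t]? = none := List.getElem?_eq_none (by simp; omega)
    rw [List.getElem?_map, hnone]; rfl

-- ---- §1 : port A computes pvCell ----

lemma pvA_inner (a b : String) (i : Nat)
    (prev : List Int) (hpl : prev.length = b.toList.length + 1)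
    (hprev : ∀ t, t ≤ b.toList.length → prev.getD t 0 = pvCell a.toList b.toList i t) :
    ∀ (J : Nat), J ≤ b.toList.length → ∀ (curr : List Int), curr.length = b.toList.length + 1 →
      curr.getD 0 0 = (i : Int) + 1 →
      (((PySem.List.pyRange 1 ((J : Int) + 1) 1).foldl (fun (curr : List Int) j =>
      curr.set j.toNat (min (min (PySem.List.pyGetD curr (j - 1) 0 + 1) (PySem.List.pyGetD prev j 0 + 1))
        (PySem.List.pyGetD prev (j - 1) 0 +
          (if PySem.List.pyGetD a.toList ((i : Int) + 1 - 1) ' ' = PySem.List.pyGetD b.toList (j - 1) ' ' then 0 else 1)))) curr).length = b.toList.length + 1)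
      ∧ (∀ t, t ≤ J →
        ((PySem.List.pyRange 1 ((J : Int) + 1) 1).foldl (fun (curr : List Int) j =>
      curr.set j.toNat (min (min (PySem.List.pyGetD curr (j - 1) 0 + 1) (PySem.List.pyGetD prev j 0 + 1))
        (PySem.List.pyGetD prev (j - 1) 0 +
          (if PySem.List.pyGetD a.toList ((i : Int) + 1 - 1) ' ' = PySem.List.pyGetD b.toList (j - 1) ' ' then 0 else 1)))) curr).getD t 0 = pvCell a.toList b.toList (i + 1) t) := by
  intro J
  induction J with
  | zero =>
      intro _ curr hcl hc0
      have h0 : ((0:Nat):Int) + 1 = 1 := by norm_num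
      rw [h0]
      have h11 : PySem.List.pyRange 1 1 1 = [] := by decide
      rw [h11]
      simp only [List.foldl_nil]
      refine ⟨hcl, ?_⟩
      intro t ht
      have ht0 : t = 0 := by omega
      subst ht0
      rw [hc0, pvCell_zero_right]
      push_cast; ring
  | succ J ihJ =>
      intro hJ curr hcl hc0
      obtain ⟨ihlen, ihval⟩ := ihJ (by omega) curr hcl hc0
      have hle : (1:Int) ≤ (J:Int) + 1 := by omega
      have hc2 : ((J+1:Nat):Int) + 1 = ((J:Int) + 1) + 1 := by push_cast; ring
      rw [hc2, PySem.List.pyRange_one_succ_right hle, List.foldl_append]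
      simp only [List.foldl_cons, List.foldl_nil]
      have hJt : ((J:Int)+1).toNat = J + 1 := by omega
      have e1 : (J:Int) + 1 - 1 = ((J:Nat):Int) := by ring
      rw [e1, hJt]
      have g1 : PySem.List.pyGetD prev ((J:Int)+1) 0 = prev.getD (J+1) 0 := by
        rw [show (J:Int) + 1 = ((J+1:Nat):Int) by push_cast; ring, PySem.List.pyGetD_natCast]
      have g2 : ∀ X : List Int, PySem.List.pyGetD X ((J:Nat):Int) 0 = X.getD J 0 :=
        fun X => PySem.List.pyGetD_natCast X J 0
      have g3 : PySem.List.pyGetD b.toList ((J:Nat):Int) ' ' = b.toList.getD J ' ' :=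
        PySem.List.pyGetD_natCast _ J _
      have g4 : PySem.List.pyGetD a.toList ((i:Int)+1-1) ' ' = a.toList.getD i ' ' := by
        rw [show (i:Int) + 1 - 1 = ((i:Nat):Int) by ring, PySem.List.pyGetD_natCast]
      rw [g4] at ihlen ihval ⊢
      rw [g1, g2, g2, g3]
      rw [ihval J (by omega), hprev (J+1) (by omega), hprev J (by omega)]
      have hv : min (min (pvCell a.toList b.toList (i+1) J + 1) (pvCell a.toList b.toList i (J+1) + 1))
          (pvCell a.toList b.toList i J + (if a.toList.getD i ' ' = b.toList.getD J ' ' then 0 else 1))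
          = pvCell a.toList b.toList (i+1) (J+1) := by
        have hu : pvCell a.toList b.toList (i+1) (J+1)
            = min (min (pvCell a.toList b.toList (i+1) J + 1) (pvCell a.toList b.toList i (J+1) + 1))
              (pvCell a.toList b.toList i J + (if a.toList.getD i ' ' = b.toList.getD J ' ' then 0 else 1)) := by
          simp [pvCell]
        rw [hu]
      rw [hv]
      constructor
      · rw [List.length_set]; exact ihlen
      · intro t ht
        rw [pvGetD_set]
        by_cases hteq : J + 1 = t
        · rw [if_pos ⟨hteq, by rw [ihlen]; omega⟩, ← hteq]
        · rw [if_neg (fun hc => hteq hc.1)]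
          exact ihval t (by omega)

lemma pvA_outer (a b : String) : ∀ (I : Nat), I ≤ a.toList.length →
    ((List.foldl
        (fun (pc : List Int × List Int) i =>
          (List.foldl
            (fun (curr : List Int) j =>
              curr.set j.toNat (min (min (PySem.List.pyGetD curr (j - 1) 0 + 1) (PySem.List.pyGetD pc.1 j 0 + 1))
                (PySem.List.pyGetD pc.1 (j - 1) 0 +
                  (if PySem.List.pyGetD a.toList (i - 1) ' ' = PySem.List.pyGetD b.toList (j - 1) ' ' then 0 else 1))))
            (pc.2.set 0 i) (PySem.List.pyRange 1 ((b.toList.length : Int) + 1) 1), pc.1))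
        (PySem.List.pyRange 0 ((b.toList.length : Int) + 1) 1, List.replicate (b.toList.length + 1) (0:Int))
        (PySem.List.pyRange 1 ((I : Int) + 1) 1)).1.length = b.toList.length + 1)
    ∧ ((List.foldl
        (fun (pc : List Int × List Int) i =>
          (List.foldl
            (fun (curr : List Int) j =>
              curr.set j.toNat (min (min (PySem.List.pyGetD curr (j - 1) 0 + 1) (PySem.List.pyGetD pc.1 j 0 + 1))
                (PySem.List.pyGetD pc.1 (j - 1) 0 +
                  (if PySem.List.pyGetD a.toList (i - 1) ' ' = PySem.List.pyGetD b.toList (j - 1) ' ' then 0 else 1))))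
            (pc.2.set 0 i) (PySem.List.pyRange 1 ((b.toList.length : Int) + 1) 1), pc.1))
        (PySem.List.pyRange 0 ((b.toList.length : Int) + 1) 1, List.replicate (b.toList.length + 1) (0:Int))
        (PySem.List.pyRange 1 ((I : Int) + 1) 1)).2.length = b.toList.length + 1)
    ∧ (∀ t, t ≤ b.toList.length → (List.foldl
        (fun (pc : List Int × List Int) i =>
          (List.foldl
            (fun (curr : List Int) j =>
              curr.set j.toNat (min (min (PySem.List.pyGetD curr (j - 1) 0 + 1) (PySem.List.pyGetD pc.1 j 0 + 1))
                (PySem.List.pyGetD pc.1 (j - 1) 0 +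
                  (if PySem.List.pyGetD a.toList (i - 1) ' ' = PySem.List.pyGetD b.toList (j - 1) ' ' then 0 else 1))))
            (pc.2.set 0 i) (PySem.List.pyRange 1 ((b.toList.length : Int) + 1) 1), pc.1))
        (PySem.List.pyRange 0 ((b.toList.length : Int) + 1) 1, List.replicate (b.toList.length + 1) (0:Int))
        (PySem.List.pyRange 1 ((I : Int) + 1) 1)).1.getD t 0 = pvCell a.toList b.toList I t) := by
  intro I
  induction I with
  | zero =>
      intro _
      have h0 : ((0:Nat):Int) + 1 = 1 := by norm_num
      rw [h0]
      have h11 : PySem.List.pyRange 1 1 1 = [] := by decide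
      rw [h11]
      simp only [List.foldl_nil]
      have hc : ((b.toList.length : Int) + 1) = ((b.toList.length + 1 : Nat) : Int) := by push_cast; ring
      refine ⟨?_, ?_, ?_⟩
      · rw [hc, PySem.List.pyRange_zero_natCast]; simp
      · simp
      · intro t ht
        rw [hc, PySem.List.pyRange_zero_natCast]
        show ((List.range (b.toList.length + 1)).map (fun k => ((k : Nat) : Int))).getD t 0 = _
        rw [pvGetD_map_range, if_pos (by omega)]
        simp [pvCell]
  | succ I ihI =>
      intro hI
      obtain ⟨hpl, hcl, hpv⟩ := ihI (by omega)
      have hle : (1:Int) ≤ (I:Int) + 1 := by omega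
      have hc2 : ((I+1:Nat):Int) + 1 = ((I:Int) + 1) + 1 := by push_cast; ring
      rw [hc2, PySem.List.pyRange_one_succ_right hle, List.foldl_append]
      simp only [List.foldl_cons, List.foldl_nil]
      set P := (List.foldl
        (fun (pc : List Int × List Int) i =>
          (List.foldl
            (fun (curr : List Int) j =>
              curr.set j.toNat (min (min (PySem.List.pyGetD curr (j - 1) 0 + 1) (PySem.List.pyGetD pc.1 j 0 + 1))
                (PySem.List.pyGetD pc.1 (j - 1) 0 +
                  (if PySem.List.pyGetD a.toList (i - 1) ' ' = PySem.List.pyGetD b.toList (j - 1) ' ' then 0 else 1))))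
            (pc.2.set 0 i) (PySem.List.pyRange 1 ((b.toList.length : Int) + 1) 1), pc.1))
        (PySem.List.pyRange 0 ((b.toList.length : Int) + 1) 1, List.replicate (b.toList.length + 1) (0:Int))
        (PySem.List.pyRange 1 ((I : Int) + 1) 1)) with hP
      have hinner := pvA_inner a b I P.1 hpl hpv b.toList.length (le_refl _)
        (P.2.set 0 ((I : Int) + 1))
        (by rw [List.length_set]; exact hcl)
        (by rw [pvGetD_set, if_pos ⟨rfl, by rw [hcl]; omega⟩])
      exact ⟨hinner.1, hpl, fun t ht => hinner.2 t ht⟩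

lemma pvA_spec (a b : String) :
    optimized_levenshtein a b = pvCell a.toList b.toList a.toList.length b.toList.length := by
  have h1 := pvA_outer a b a.toList.length (le_refl _)
  simp only [optimized_levenshtein, PySem.Str.len]
  have hrep : ((b.toList.length : Int) + 1).toNat = b.toList.length + 1 := by omega
  simp only [hrep]
  rw [PySem.List.pyGetD_natCast]
  exact h1.2.2 b.toList.length (le_refl _)

-- ---- §2 : port B computes pvCell, with sound early exit ----

lemma pvAltStep_spec (al bl : List Char) (i : Nat) :
    ∀ (cbs olds : List _) (j0 : Nat), bl.drop j0 = cbs →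
      olds = (List.range (bl.length - j0)).map (fun t => pvCell al bl i (j0 + t + 1)) →
      pvAltStep (al.getD i ' ') (pvCell al bl i j0) (pvCell al bl (i+1) j0) cbs olds
        = (List.range (bl.length - j0)).map (fun t => pvCell al bl (i+1) (j0 + t + 1)) := by
  intro cbs
  induction cbs with
  | nil =>
      intro olds j0 hdrop holds
      have hlen : bl.length ≤ j0 := by
        have := congrArg List.length hdrop; simp [List.length_drop] at this; omega
      have hz : bl.length - j0 = 0 := by omega
      rw [hz] at holds ⊢
      subst holds
      simp [pvAltStep]
  | cons cb cbs' ih =>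
      intro olds j0 hdrop holds
      have hj0 : j0 < bl.length := by
        have := congrArg List.length hdrop; simp [List.length_drop] at this; omega
      have hcb : bl.getD j0 ' ' = cb := by
        have h0 : (bl.drop j0)[0]? = some cb := by rw [hdrop]; rfl
        rw [List.getElem?_drop] at h0
        simp only [Nat.add_zero] at h0
        rw [List.getD_eq_getElem?_getD, h0]; rfl
      have hcbs : bl.drop (j0+1) = cbs' := by rw [← List.tail_drop, hdrop]; rfl
      have hlen : bl.length - j0 = (bl.length - (j0+1)) + 1 := by omega
      rw [hlen] at holds ⊢
      rw [List.range_succ_eq_map] at holds ⊢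
      simp only [List.map_cons, List.map_map] at holds ⊢
      have hfun : (fun t => pvCell al bl i (j0 + t + 1)) ∘ Nat.succ = (fun t => pvCell al bl i ((j0+1) + t + 1)) := by
        funext t; simp only [Function.comp]; congr 1; omega
      have hfun2 : (fun t => pvCell al bl (i+1) (j0 + t + 1)) ∘ Nat.succ = (fun t => pvCell al bl (i+1) ((j0+1) + t + 1)) := by
        funext t; simp only [Function.comp]; congr 1; omega
      rw [hfun] at holds
      rw [hfun2]
      simp only [Nat.add_zero] at holds ⊢
      subst holds
      simp only [pvAltStep]
      have hv : min (min (pvCell al bl i (j0+1) + 1) (pvCell al bl (i+1) j0 + 1))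
          (pvCell al bl i j0 + (if al.getD i ' ' = cb then 0 else 1)) = pvCell al bl (i+1) (j0+1) := by
        rw [← hcb]
        have hu : pvCell al bl (i+1) (j0+1)
            = min (min (pvCell al bl (i+1) j0 + 1) (pvCell al bl i (j0+1) + 1))
              (pvCell al bl i j0 + (if al.getD i ' ' = bl.getD j0 ' ' then 0 else 1)) := by
          simp [pvCell]
        rw [hu]
        split_ifs <;> omega
      rw [hv]
      congr 1
      exact ih _ (j0+1) hcbs rfl

lemma pvAltRow_spec (al bl : List Char) (i : Nat) (ca : Char) (hca : ca = al.getD i ' ') :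
    pvAltRow ca ((i : Int) + 1) bl (pvRow al bl i) = pvRow al bl (i + 1) := by
  subst hca
  have hrow : ∀ r : Nat, pvRow al bl r
      = pvCell al bl r 0 :: (List.range bl.length).map (fun t => pvCell al bl r (t+1)) := by
    intro r
    unfold pvRow
    rw [List.range_succ_eq_map]
    simp [List.map_map, Function.comp, Nat.succ_eq_add_one]
  rw [hrow i, hrow (i+1)]
  unfold pvAltRow
  simp only [List.headD_cons, List.tail_cons]
  have h0 : ((i:Int)+1) = pvCell al bl (i+1) 0 := by rw [pvCell_zero_right]; push_cast; ring
  rw [h0]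
  congr 1
  have hstep := pvAltStep_spec al bl i bl
      ((List.range (bl.length - 0)).map (fun t => pvCell al bl i (0 + t + 1))) 0 rfl rfl
  simp only [Nat.sub_zero, Nat.zero_add] at hstep
  exact hstep

lemma pvCell_row_gt (al bl : List Char) (seuil : Int) (i : Nat)
    (h : ∀ t, t ≤ bl.length → seuil < pvCell al bl i t) :
    ∀ t, t ≤ bl.length → seuil < pvCell al bl (i + 1) t := by
  intro t ht
  induction t with
  | zero =>
      have h0 := h 0 (Nat.zero_le _)
      rw [pvCell_zero_right] at h0 ⊢
      push_cast; omega
  | succ t ih =>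
      have h1 := ih (by omega)
      have h2 := h (t + 1) ht
      have h3 := h t (by omega)
      show seuil < pvCell al bl (i+1) (t+1)
      rw [pvCell]
      simp only [lt_min_iff]
      refine ⟨⟨by omega, by omega⟩, ?_⟩
      split_ifs <;> omega

lemma pvCell_rows_gt (al bl : List Char) (seuil : Int) (i : Nat)
    (h : ∀ t, t ≤ bl.length → seuil < pvCell al bl i t) :
    ∀ i', i ≤ i' → ∀ t, t ≤ bl.length → seuil < pvCell al bl i' t := by
  intro i' hii'
  induction i' with
  | zero => have : i = 0 := by omega
            subst this; exact h
  | succ k ih =>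
      rcases Nat.lt_or_ge i (k+1) with hlt | hge
      · exact pvCell_row_gt al bl seuil k (ih (by omega))
      · have : i = k + 1 := by omega
        subst this; exact h

lemma pvAltLoop_spec (al bl : List Char) (seuil : Int) :
    ∀ (rest : List Char) (i0 : Nat), al.drop i0 = rest → i0 ≤ al.length →
      pvAltLoop seuil bl (bl.length : Int) rest ((i0 : Int) + 1) (pvRow al bl i0)
          = some (pvCell al bl al.length bl.length)
      ∨ (pvAltLoop seuil bl (bl.length : Int) rest ((i0 : Int) + 1) (pvRow al bl i0) = none
          ∧ seuil < pvCell al bl al.length bl.length) := by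
  intro rest
  induction rest with
  | nil =>
      intro i0 hdrop hi0
      have hlen : al.length ≤ i0 := by
        have := congrArg List.length hdrop; simp [List.length_drop] at this; omega
      have hin : i0 = al.length := by omega
      subst hin
      left
      simp only [pvAltLoop]
      rw [PySem.List.pyGetD_natCast]
      unfold pvRow
      rw [pvGetD_map_range, if_pos (by omega)]
  | cons ca rest' ih =>
      intro i0 hdrop hi0
      have hi0n : i0 < al.length := by
        have := congrArg List.length hdrop; simp [List.length_drop] at this; omega
      have hca : ca = al.getD i0 ' ' := by
        have h0 : (al.drop i0)[0]? = some ca := by rw [hdrop]; rfl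
        rw [List.getElem?_drop] at h0
        simp only [Nat.add_zero] at h0
        rw [List.getD_eq_getElem?_getD, h0]; rfl
      have hdrop' : al.drop (i0+1) = rest' := by rw [← List.tail_drop, hdrop]; rfl
      simp only [pvAltLoop]
      rw [pvAltRow_spec al bl i0 ca hca]
      obtain ⟨mn, hmn⟩ : ∃ mn, PySem.List.min? (pvRow al bl (i0+1)) (fun x => x) = some mn := by
        cases h : PySem.List.min? (pvRow al bl (i0+1)) (fun x => x) with
        | some mn => exact ⟨mn, rfl⟩
        | none =>
            have hnil := (PySem.List.min?_eq_none_iff _ _).mp h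
            exact absurd hnil (by unfold pvRow; simp)
      rw [hmn]
      have hred : (match some mn with
          | some m => if m > seuil then none
              else pvAltLoop seuil bl (bl.length : Int) rest' ((i0:Int) + 1 + 1) (pvRow al bl (i0 + 1))
          | none => none)
          = if mn > seuil then none
              else pvAltLoop seuil bl (bl.length : Int) rest' ((i0:Int) + 1 + 1) (pvRow al bl (i0 + 1)) := rfl
      rw [hred]
      by_cases hgt : mn > seuil
      · rw [if_pos hgt]
        right
        refine ⟨rfl, ?_⟩
        have hall : ∀ t, t ≤ bl.length → seuil < pvCell al bl (i0+1) t := by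
          intro t ht
          have hmem : pvCell al bl (i0+1) t ∈ pvRow al bl (i0+1) := by
            unfold pvRow
            exact List.mem_map.mpr ⟨t, List.mem_range.mpr (by omega), rfl⟩
          have hmin := PySem.List.min?_isMin hmn _ hmem
          simp only at hmin
          omega
        exact pvCell_rows_gt al bl seuil (i0+1) hall al.length (by omega) bl.length (le_refl _)
      · rw [if_neg hgt]
        have hc : (i0:Int) + 1 + 1 = ((i0+1:Nat):Int) + 1 := by push_cast; ring
        rw [hc]
        exact ih (i0+1) hdrop' (by omega)

lemma pvAltDistance_spec (a b : String) (seuil : Int) :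
    pvAltDistance a b seuil = some (pvCell a.toList b.toList a.toList.length b.toList.length)
    ∨ (pvAltDistance a b seuil = none
        ∧ seuil < pvCell a.toList b.toList a.toList.length b.toList.length) := by
  simp only [pvAltDistance, PySem.Str.len]
  have hrow : PySem.List.pyRange 0 ((b.toList.length : Int) + 1) 1 = pvRow a.toList b.toList 0 := by
    rw [show ((b.toList.length : Int) + 1) = ((b.toList.length + 1 : Nat) : Int) by push_cast; ring,
      PySem.List.pyRange_zero_natCast]
    unfold pvRow
    apply List.map_congr_left
    intro t _
    simp [pvCell]
  rw [hrow]
  have := pvAltLoop_spec a.toList b.toList seuil a.toList 0 rfl (by omega)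
  simpa using this

lemma pvDist_cases (a b : String) (seuil : Int) :
    pvAltDistance a b seuil = some (optimized_levenshtein a b)
    ∨ (pvAltDistance a b seuil = none ∧ seuil < optimized_levenshtein a b) := by
  rw [pvA_spec]; exact pvAltDistance_spec a b seuil

-- ---- §3 : buckets concatenated in key order = stable sort by distance ----

def pvFlat (bk : PySem.Dict Int (List String)) : List (String × Int) :=
  (PySem.List.sorted bk.keys (fun k => k) false).flatMap (fun k => (bk.getD k []).map (fun w => (w, k)))

lemma pvFlatMap_congr {α β : Type} (l : List α) (f g : α → List β) (h : ∀ a ∈ l, f a = g a) :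
    l.flatMap f = l.flatMap g := by
  induction l with
  | nil => rfl
  | cons x xs ih =>
      simp only [List.flatMap_cons, h x (by simp)]
      rw [ih (fun a ha => h a (by simp [ha]))]

lemma pvInsertBy_append {α : Type} (p : α → α → Bool) (x : α) (u v : List α)
    (h : ∀ y ∈ u, p x y = false) :
    PySem.List.insertBy p x (u ++ v) = u ++ PySem.List.insertBy p x v := by
  induction u with
  | nil => rfl
  | cons y ys ih =>
      have hy : p x y = false := h y (by simp)
      simp [PySem.List.insertBy, hy, ih (fun z hz => h z (by simp [hz]))]

lemma pvInsertBy_flat_gt (mot : String) (d : Int) (ks : List Int) (g : Int → List String)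
    (hgt : ∀ k ∈ ks, d < k) (hne : ∀ k ∈ ks, g k ≠ []) :
    PySem.List.insertBy (fun a b => decide ((a : String × Int).2 < b.2)) (mot, d)
        (ks.flatMap (fun k => (g k).map (fun w => (w, k))))
      = (mot, d) :: ks.flatMap (fun k => (g k).map (fun w => (w, k))) := by
  cases ks with
  | nil => rfl
  | cons k ks' =>
      have hk : d < k := hgt k (by simp)
      cases hgk : g k with
      | nil => exact absurd hgk (hne k (by simp))
      | cons c cs =>
          simp [hgk, PySem.List.insertBy, hk]

lemma pvInsert_flat (mot : String) (d : Int) :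
    ∀ (ks : List Int) (g : Int → List String), ks.Pairwise (· < ·) → (∀ k ∈ ks, g k ≠ []) →
      PySem.List.insertBy (fun a b => decide ((a : String × Int).2 < b.2)) (mot, d)
          (ks.flatMap (fun k => (g k).map (fun w => (w, k))))
        = if d ∈ ks
          then ks.flatMap (fun k => ((if k = d then g k ++ [mot] else g k)).map (fun w => (w, k)))
          else (PySem.List.insertBy (fun a b => decide (a < b)) d ks).flatMap
                (fun k => ((if k = d then [mot] else g k)).map (fun w => (w, k))) := by
  intro ks
  induction ks with
  | nil =>
      intro g _ _
      simp [PySem.List.insertBy]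
  | cons k ks' ih =>
      intro g hpw hne
      obtain ⟨hkall, hpwt⟩ := List.pairwise_cons.mp hpw
      have hnet : ∀ k' ∈ ks', g k' ≠ [] := fun k' h => hne k' (List.mem_cons_of_mem _ h)
      have hgk := hne k (List.mem_cons_self)
      rcases lt_trichotomy d k with hdk | hdk | hdk
      · -- d < k : the new key is inserted in front of everything
        have hdks' : d ∉ ks' := fun hm => absurd (hkall d hm) (by omega)
        have hdmem : d ∉ k :: ks' := by
          simp only [List.mem_cons, not_or]
          exact ⟨by omega, hdks'⟩
        rw [if_neg hdmem]
        cases hgke : g k with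
        | nil => exact absurd hgke hgk
        | cons c cs =>
            have hl : PySem.List.insertBy (fun a b => decide (a < b)) d (k :: ks') = d :: k :: ks' := by
              simp [PySem.List.insertBy, hdk]
            rw [hl]
            simp only [List.flatMap_cons, hgke, List.map_cons, List.cons_append]
            have hstep : PySem.List.insertBy (fun a b => decide ((a : String × Int).2 < b.2)) (mot, d)
                ((c, k) :: (List.map (fun w => (w, k)) cs
                    ++ List.flatMap (fun k => List.map (fun w => (w, k)) (g k)) ks'))
                = (mot, d) :: (c, k) :: (List.map (fun w => (w, k)) cs
                    ++ List.flatMap (fun k => List.map (fun w => (w, k)) (g k)) ks') := by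
              simp [PySem.List.insertBy, hdk]
            rw [hstep]
            rw [pvFlatMap_congr ks'
              (fun k' => (if k' = d then [mot] else g k').map (fun w => (w, k')))
              (fun k' => (g k').map (fun w => (w, k')))
              (fun k' hk' => by
                have hkd2 : k' ≠ d := by have := hkall k' hk'; omega
                simp [hkd2])]
            simp [show k ≠ d by omega]
      · -- d = k : appended at the end of its (existing) bucket
        subst hdk
        rw [if_pos (List.mem_cons_self)]
        simp only [List.flatMap_cons]
        rw [pvInsertBy_append _ _ _ _ (by
          intro y hy
          obtain ⟨w, hw, rfl⟩ := List.mem_map.mp hy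
          simp)]
        rw [pvInsertBy_flat_gt mot d ks' g hkall hnet]
        rw [pvFlatMap_congr ks'
          (fun k' => (if k' = d then g k' ++ [mot] else g k').map (fun w => (w, k')))
          (fun k' => (g k').map (fun w => (w, k')))
          (fun k' hk' => by
            have hkd2 : k' ≠ d := by have := hkall k' hk'; omega
            simp [hkd2])]
        simp
      · -- k < d : skip the first bucket on both sides
        have hkd' : ¬ d < k := by omega
        simp only [List.flatMap_cons]
        rw [pvInsertBy_append _ _ _ _ (by
          intro y hy
          obtain ⟨w, hw, rfl⟩ := List.mem_map.mp hy
          simp [hkd'])]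
        rw [ih g hpwt hnet]
        by_cases hd : d ∈ ks'
        · rw [if_pos hd, if_pos (List.mem_cons_of_mem _ hd)]
          rw [if_neg (show k ≠ d by omega)]
        · rw [if_neg hd, if_neg (by
            simp only [List.mem_cons, not_or]
            exact ⟨by omega, hd⟩)]
          have hins : PySem.List.insertBy (fun a b => decide (a < b)) d (k :: ks')
              = k :: PySem.List.insertBy (fun a b => decide (a < b)) d ks' := by
            simp [PySem.List.insertBy, hkd']
          rw [hins]
          simp only [List.flatMap_cons]
          rw [if_neg (show k ≠ d by omega)]

-- Dict facts for the bucket dictionary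
lemma pvKeys_insert (bk : PySem.Dict Int (List String)) (d : Int) (v : List String) :
    (bk.insert d v).keys = if d ∈ bk.keys then bk.keys else bk.keys ++ [d] := by
  by_cases h : d ∈ bk.keys
  · rw [if_pos h]
    have hc : bk.contains d = true := by
      simp only [PySem.Dict.keys] at h
      obtain ⟨p, hp, hpd⟩ := List.mem_map.mp h
      simp only [PySem.Dict.contains, List.any_eq_true]
      exact ⟨p, hp, beq_iff_eq.mpr hpd⟩
    simp only [PySem.Dict.insert, hc, if_true, PySem.Dict.keys]
    rw [List.map_map]
    apply List.map_congr_left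
    intro p _
    by_cases hpd : p.1 = d <;> simp [hpd]
  · rw [if_neg h]
    have hc : bk.contains d = false := by
      cases hv : bk.contains d with
      | false => rfl
      | true =>
          exfalso; apply h
          simp only [PySem.Dict.contains, List.any_eq_true] at hv
          obtain ⟨p, hp, hpd⟩ := hv
          simp only [PySem.Dict.keys]
          exact List.mem_map.mpr ⟨p, hp, by simpa using hpd⟩
    simp [PySem.Dict.insert, hc, PySem.Dict.keys]

lemma pvGetD_not_mem (bk : PySem.Dict Int (List String)) (d : Int) (v0 : List String)
    (h : d ∉ bk.keys) : bk.getD d v0 = v0 := by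
  simp only [PySem.Dict.getD, PySem.Dict.get?]
  have hf : bk.items.find? (fun p => p.1 == d) = none := by
    rw [List.find?_eq_none]
    intro p hp
    simp only [beq_iff_eq]
    intro he
    exact h (by simp only [PySem.Dict.keys]; exact List.mem_map.mpr ⟨p, hp, he⟩)
  rw [hf]; rfl

lemma pvSorted_append_singleton {α κ : Type} [LT κ] [DecidableLT κ] (xs : List α) (x : α) (key : α → κ) :
    PySem.List.sorted (xs ++ [x]) key false
      = PySem.List.insertBy (fun a b => decide (key a < key b)) x (PySem.List.sorted xs key false) := by
  rw [PySem.List.sorted_eq_foldl_insertBy, PySem.List.sorted_eq_foldl_insertBy, List.foldl_append]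
  rfl

lemma pvKs_pairwise (bk : PySem.Dict Int (List String)) (hnd : bk.keys.Nodup) :
    (PySem.List.sorted bk.keys (fun k => k) false).Pairwise (· < ·) := by
  have h1 := PySem.List.sorted_pairwise bk.keys (fun k => k)
  have h2 : (PySem.List.sorted bk.keys (fun k => k) false).Nodup :=
    ((PySem.List.sorted_perm bk.keys (fun k => k) false).nodup_iff).2 hnd
  exact (h1.and h2).imp (fun h => lt_of_le_of_ne h.1 h.2)

lemma pvInsert_step (bk : PySem.Dict Int (List String)) (ds : List (String × Int))
    (mot : String) (d : Int)
    (hnd : bk.keys.Nodup) (hne : ∀ k ∈ bk.keys, bk.getD k [] ≠ [])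
    (heq : PySem.List.sorted ds (fun x => x.2) false = pvFlat bk) :
    (bk.insert d (bk.getD d [] ++ [mot])).keys.Nodup
    ∧ (∀ k ∈ (bk.insert d (bk.getD d [] ++ [mot])).keys,
        (bk.insert d (bk.getD d [] ++ [mot])).getD k [] ≠ [])
    ∧ PySem.List.sorted (ds ++ [(mot, d)]) (fun x => x.2) false
        = pvFlat (bk.insert d (bk.getD d [] ++ [mot])) := by
  have hperm := PySem.List.sorted_perm bk.keys (fun k => k) false
  have hpw := pvKs_pairwise bk hnd
  have hne' : ∀ k ∈ PySem.List.sorted bk.keys (fun k => k) false, bk.getD k [] ≠ [] :=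
    fun k hk => hne k (hperm.subset hk)
  refine ⟨?_, ?_, ?_⟩
  · rw [pvKeys_insert]
    split_ifs with h
    · exact hnd
    · simp [List.nodup_append, hnd]
      exact fun a ha had => h (had ▸ ha)
  · intro k hk
    rw [PySem.Dict.getD_insert]
    by_cases hkd : k = d
    · rw [if_pos hkd]; simp
    · rw [if_neg hkd]
      rw [pvKeys_insert] at hk
      split_ifs at hk with h
      · exact hne k hk
      · rcases List.mem_append.mp hk with hk | hk
        · exact hne k hk
        · simp at hk; exact absurd hk hkd
  · rw [pvSorted_append_singleton, heq]
    unfold pvFlat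
    rw [pvInsert_flat mot d _ _ hpw hne']
    rw [pvKeys_insert]
    by_cases hd : d ∈ bk.keys
    · rw [if_pos (hperm.mem_iff.mpr hd), if_pos hd]
      apply pvFlatMap_congr
      intro k _
      rw [PySem.Dict.getD_insert]
      by_cases hkd : k = d
      · rw [if_pos hkd, if_pos hkd, hkd]
      · rw [if_neg hkd, if_neg hkd]
    · rw [if_neg (fun hc => hd (hperm.mem_iff.mp hc)), if_neg hd]
      rw [pvSorted_append_singleton]
      apply pvFlatMap_congr
      intro k _
      rw [PySem.Dict.getD_insert]
      by_cases hkd : k = d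
      · rw [if_pos hkd, if_pos hkd, hkd, pvGetD_not_mem bk d [] hd]
        simp
      · rw [if_neg hkd, if_neg hkd]

lemma pvFold_inv (partiel : String) (seuil : Int) :
    ∀ (mots : List String) (ds : List (String × Int)) (bk : PySem.Dict Int (List String)),
      bk.keys.Nodup → (∀ k ∈ bk.keys, bk.getD k [] ≠ []) →
      PySem.List.sorted ds (fun x => x.2) false = pvFlat bk →
      (mots.foldl (fun (bk : PySem.Dict Int (List String)) mot =>
          if |PySem.Str.len mot - PySem.Str.len partiel| ≤ seuil then
            match pvAltDistance partiel mot seuil with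
            | some d => if d ≤ seuil then bk.insert d (bk.getD d [] ++ [mot]) else bk
            | none => bk
          else bk) bk).keys.Nodup
      ∧ (∀ k ∈ (mots.foldl (fun (bk : PySem.Dict Int (List String)) mot =>
          if |PySem.Str.len mot - PySem.Str.len partiel| ≤ seuil then
            match pvAltDistance partiel mot seuil with
            | some d => if d ≤ seuil then bk.insert d (bk.getD d [] ++ [mot]) else bk
            | none => bk
          else bk) bk).keys,
          (mots.foldl (fun (bk : PySem.Dict Int (List String)) mot =>
          if |PySem.Str.len mot - PySem.Str.len partiel| ≤ seuil then
            match pvAltDistance partiel mot seuil with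
            | some d => if d ≤ seuil then bk.insert d (bk.getD d [] ++ [mot]) else bk
            | none => bk
          else bk) bk).getD k [] ≠ [])
      ∧ PySem.List.sorted (mots.foldl (fun (ds : List (String × Int)) mot =>
          if |PySem.Str.len mot - PySem.Str.len partiel| ≤ seuil then
            if optimized_levenshtein partiel mot ≤ seuil then ds ++ [(mot, optimized_levenshtein partiel mot)] else ds
          else ds) ds) (fun x => x.2) false
        = pvFlat (mots.foldl (fun (bk : PySem.Dict Int (List String)) mot =>
          if |PySem.Str.len mot - PySem.Str.len partiel| ≤ seuil then
            match pvAltDistance partiel mot seuil with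
            | some d => if d ≤ seuil then bk.insert d (bk.getD d [] ++ [mot]) else bk
            | none => bk
          else bk) bk) := by
  intro mots
  induction mots with
  | nil =>
      intro ds bk hnd hne heq
      simpa using ⟨hnd, hne, heq⟩
  | cons mot mots ih =>
      intro ds bk hnd hne heq
      simp only [List.foldl_cons]
      by_cases hf : |PySem.Str.len mot - PySem.Str.len partiel| ≤ seuil
      · simp only [if_pos hf]
        rcases pvDist_cases partiel mot seuil with hsome | ⟨hnone, hgt⟩
        · rw [hsome]
          by_cases hds : optimized_levenshtein partiel mot ≤ seuil
          · simp only [if_pos hds]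
            obtain ⟨h1, h2, h3⟩ := pvInsert_step bk ds mot (optimized_levenshtein partiel mot) hnd hne heq
            exact ih _ _ h1 h2 h3
          · simp only [if_neg hds]
            exact ih ds bk hnd hne heq
        · rw [hnone]
          have hnds : ¬ optimized_levenshtein partiel mot ≤ seuil := by omega
          simp only [if_neg hnds]
          exact ih ds bk hnd hne heq
      · simp only [if_neg hf]
        exact ih ds bk hnd hne heq

lemma pvSlice_map {α β : Type} (f : α → β) (xs : List α) (k : Int) :
    (PySem.List.slice xs none (some k)).map f = PySem.List.slice (xs.map f) none (some k) := by
  simp [PySem.List.slice, PySem.List.clampIdx, List.map_take]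

-- ===== VERDICT (by name: the statement is the Claim_ definition above) =====
theorem suggestions_completion_spec : Claim_equal_suggestions_completion := by
  intro partiel dictionnaire seuil max_suggestions _
  unfold Spec_suggestions_completion
  have hempty_nd : (PySem.Dict.empty : PySem.Dict Int (List String)).keys.Nodup := by
    simp [PySem.Dict.keys, PySem.Dict.empty]
  have hempty_ne : ∀ k ∈ (PySem.Dict.empty : PySem.Dict Int (List String)).keys,
      (PySem.Dict.empty : PySem.Dict Int (List String)).getD k [] ≠ [] := by
    simp [PySem.Dict.keys, PySem.Dict.empty]
  have hempty_eq : PySem.List.sorted ([] : List (String × Int)) (fun x => x.2) false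
      = pvFlat PySem.Dict.empty := by
    unfold pvFlat
    rw [PySem.List.sorted_eq_foldl_insertBy, PySem.List.sorted_eq_foldl_insertBy]
    rfl
  obtain ⟨hnd, hne, heq⟩ :=
    pvFold_inv partiel seuil dictionnaire [] PySem.Dict.empty hempty_nd hempty_ne hempty_eq
  simp only [suggestions_completion, suggestions_completion_alt]
  rw [heq, PySem.List.foldl_append_eq_flatMap, pvSlice_map]
  simp only [List.nil_append]
  congr 1
  unfold pvFlat
  rw [List.map_flatMap]
  apply pvFlatMap_congr
  intro k _
  rw [List.map_map]
  simp [Function.comp_def]
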